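-- pv_equiv track=rewrite | github.com/QuitoTactico/PYTHON | CODEWARS/4 kyu/Breadcrumb Generator.py | generate_bc
-- ===== SOURCE A (Python) =====
-- def acronymize(url:str):
--     trash = ["the","of","in","from","by","with","and", "for", "or", "to", "at", "a"]
--     url_list = url.split('-')
--     url_list_filtered = [item for item in url_list if item not in trash]
--
--     '''
--     for i in trash:
--         url = url.replace('-'+i, '').replace(i+'-', '')
--     '''
--
--     #url = url.replace('-', ' ')
--
--     #url = ''.join(item.upper()[0] for item in url.split())
--     url = ''.join(item.upper()[0] for item in url_list_filtered)
--     return url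
--
-- def generate_bc(url:str, separator:str):
--     trash = ['.html', '.htm', '.php', '.asp', '/index']
--     for i in trash:
--         url = url.replace(i, '')
--
--     url = url.split('#')[0].split('?')[0].split('://')[-1]
--
--     url_list = [item for item in url.split('/')[1:] if item]
--     if len(url_list) == 0:
--         return '<span class="active">HOME</span>'
--
--     names_list = [item.upper().replace('-',' ') if len(item) < 30 else acronymize(item) for item in url_list]
--
--     res_list = ['<a href="/">HOME</a>']
--     for i in range(len(url_list)):
--         href = '/'.join(url_list[:i+1])+'/'
--         if i != len(names_list)-1:
--             res_list.append(f'<a href="/{href}">{names_list[i]}</a>')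
--         else:
--             res_list.append(f'<span class="active">{names_list[i]}</span>')
--
--     return f'{separator}'.join(res_list)
-- ===== SOURCE B (Python) =====
-- STOP = ("the", "of", "in", "from", "by", "with", "and", "for", "or", "to", "at", "a")
--
--
-- def _title(seg):
--     if len(seg) < 30:
--         return seg.upper().replace('-', ' ')
--     return ''.join(w[:1].upper() for w in seg.split('-') if w not in STOP)
--
--
-- def _walk(prefix, segs, separator):
--     seg, rest = segs[0], segs[1:]
--     prefix = prefix + seg + '/'
--     if not rest:
--         return '<span class="active">' + _title(seg) + '</span>'
--     return '<a href="/' + prefix + '">' + _title(seg) + '</a>' + separator + _walk(prefix, rest, separator)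
--
--
-- def generate_bc(url, separator):
--     for junk in ('.html', '.htm', '.php', '.asp', '/index'):
--         url = url.replace(junk, '')
--     url = url.split('#')[0].split('?')[0].split('://')[-1]
--     segs = [s for s in url.split('/')[1:] if s]
--     if not segs:
--         return '<span class="active">HOME</span>'
--     return '<a href="/">HOME</a>' + separator + _walk('', segs, separator)
-- ===== Notes on version B (the rewrite author's own statement) =====
-- stated objective: alternative
-- what changed: B replaces A's staged pipeline (names_list pass, indexed res_list loop re-joining the slice url_list[:i+1] per step with an i==last branch, final separator join) by a single recursive descent over the segments that carries the running href prefix and emits the final string directly, interleaving the separator during the recursion with no intermediate crumb/name/prefix lists and no join.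
import Mathlib
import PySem

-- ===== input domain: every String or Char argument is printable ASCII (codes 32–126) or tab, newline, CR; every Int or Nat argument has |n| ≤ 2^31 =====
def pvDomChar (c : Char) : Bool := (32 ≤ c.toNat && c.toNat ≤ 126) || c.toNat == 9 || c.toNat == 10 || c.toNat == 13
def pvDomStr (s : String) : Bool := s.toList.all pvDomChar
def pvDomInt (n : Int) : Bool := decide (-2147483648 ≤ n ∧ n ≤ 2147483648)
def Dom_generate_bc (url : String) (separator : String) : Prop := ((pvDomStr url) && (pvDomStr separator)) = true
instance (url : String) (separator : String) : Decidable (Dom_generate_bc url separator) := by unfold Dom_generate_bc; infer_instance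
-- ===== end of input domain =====

-- B replaces A's staged list pipeline (names_list, indexed res_list loop re-joining url_list[:i+1],
-- final join) by one recursive descent over the segments that carries the running prefix and emits
-- the final string directly, interleaving the separator; equal return values proved on Pre_ (A
-- raises IndexError outside it).

-- ===== PORT A =====

-- stop-word list of acronymize (strings as List Char)
def pvTrashWords : List (List Char) :=
  ["the".toList, "of".toList, "in".toList, "from".toList, "by".toList, "with".toList,
   "and".toList, "for".toList, "or".toList, "to".toList, "at".toList, "a".toList]

-- acronymize(url): split on '-', drop stop words, join the uppercased first letters.
-- item.upper()[0] is ported with pyGet?; the IndexError case (an empty '-'-piece inside a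
-- >=30-char segment) is exactly what Pre_ excludes, '.elim []' only makes the port total there.
def pvAcronymize (url : List Char) : List Char :=
  let url_list := PySem.Chars.splitOn url "-".toList
  let url_list_filtered := url_list.filter (fun item => !pvTrashWords.contains item)
  PySem.Chars.join []
    (url_list_filtered.map (fun item =>
      (PySem.List.pyGet? (PySem.Chars.upper item) 0).elim [] (fun c => [c])))

def pvTrashExts : List (List Char) :=
  [".html".toList, ".htm".toList, ".php".toList, ".asp".toList, "/index".toList]

-- preprocessing of A (extension stripping, '#'/'?'/'://' splits, segment list)
def pvPrepA (url : List Char) : List (List Char) :=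
  -- for i in trash: url = url.replace(i, '')
  let u1 := pvTrashExts.foldl (fun u i => PySem.Chars.replace u i []) url
  -- url = url.split('#')[0].split('?')[0].split('://')[-1]
  let u2 := PySem.List.pyGetD (PySem.Chars.splitOn u1 "#".toList) 0 []
  let u3 := PySem.List.pyGetD (PySem.Chars.splitOn u2 "?".toList) 0 []
  let u4 := PySem.List.pyGetD (PySem.Chars.splitOn u3 "://".toList) (-1) []
  -- url_list = [item for item in url.split('/')[1:] if item]
  (PySem.List.slice (PySem.Chars.splitOn u4 "/".toList) (some 1) none).filter
      (fun item => !item.isEmpty)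

-- the rest of A: the HOME guard, names_list, the indexed res_list loop, the join
def pvTailA (url_list : List (List Char)) (separator : List Char) : String :=
  if url_list = [] then "<span class=\"active\">HOME</span>" else
  let names_list := url_list.map (fun item =>
      if PySem.Chars.len item < 30 then PySem.Chars.replace (PySem.Chars.upper item) "-".toList " ".toList
      else pvAcronymize item)
  -- res_list loop over range(len(url_list))
  let res_list := (List.range url_list.length).foldl (fun (res : List (List Char)) (i : Nat) =>
      let href := PySem.Chars.join "/".toList (PySem.List.slice url_list none (some ((i : Int) + 1))) ++ "/".toList
      if i ≠ names_list.length - 1 then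
        res ++ ["<a href=\"/".toList ++ href ++ "\">".toList ++ PySem.List.pyGetD names_list (i : Int) [] ++ "</a>".toList]
      else
        res ++ ["<span class=\"active\">".toList ++ PySem.List.pyGetD names_list (i : Int) [] ++ "</span>".toList])
    ["<a href=\"/\">HOME</a>".toList]
  String.ofList (PySem.Chars.join separator res_list)

def generate_bc (url : String) (separator : String) : String :=
  pvTailA (pvPrepA url.toList) separator.toList

-- ===== PORT B =====

-- _title(seg) of Source B; w[:1].upper() never indexes, so it is total.
def pvTitle (seg : List Char) : List Char :=
  if PySem.Chars.len seg < 30 then PySem.Chars.replace (PySem.Chars.upper seg) "-".toList " ".toList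
  else PySem.Chars.join []
    (((PySem.Chars.splitOn seg "-".toList).filter (fun w => !pvTrashWords.contains w)).map
      (fun w => PySem.Chars.upper (PySem.List.slice w none (some 1))))

-- _walk(prefix, segs, separator) of Source B: one recursive descent emitting the final string,
-- carrying the running prefix, separator interleaved during the recursion
def pvWalk (sep : List Char) (pre : List Char) : List (List Char) → List Char
  | [] => []          -- unreachable: Source B calls _walk only on non-empty segs
  | seg :: rest =>
    let pre' := pre ++ seg ++ "/".toList
    if rest = [] then
      "<span class=\"active\">".toList ++ pvTitle seg ++ "</span>".toList
    else
      "<a href=\"/".toList ++ pre' ++ "\">".toList ++ pvTitle seg ++ "</a>".toList ++ sep ++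
        pvWalk sep pre' rest

-- same preprocessing lines of Source B, B's own helper
def pvPrepB (url : List Char) : List (List Char) :=
  let u1 := pvTrashExts.foldl (fun u junk => PySem.Chars.replace u junk []) url
  let u2 := PySem.List.pyGetD (PySem.Chars.splitOn u1 "#".toList) 0 []
  let u3 := PySem.List.pyGetD (PySem.Chars.splitOn u2 "?".toList) 0 []
  let u4 := PySem.List.pyGetD (PySem.Chars.splitOn u3 "://".toList) (-1) []
  (PySem.List.slice (PySem.Chars.splitOn u4 "/".toList) (some 1) none).filter
      (fun s => !s.isEmpty)

def generate_bc_alt (url : String) (separator : String) : String :=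
  let segs := pvPrepB url.toList
  if segs = [] then "<span class=\"active\">HOME</span>"
  else String.ofList
    ("<a href=\"/\">HOME</a>".toList ++ separator.toList ++ pvWalk separator.toList [] segs)

-- ===== PRECONDITION & SPEC =====

-- Pre_'s own copy of the segment extraction (Pre_ may not reach the ports)
def pvSegsPre (url : List Char) : List (List Char) :=
  let u1 := pvTrashExts.foldl (fun u junk => PySem.Chars.replace u junk []) url
  let u2 := PySem.List.pyGetD (PySem.Chars.splitOn u1 "#".toList) 0 []
  let u3 := PySem.List.pyGetD (PySem.Chars.splitOn u2 "?".toList) 0 []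
  let u4 := PySem.List.pyGetD (PySem.Chars.splitOn u3 "://".toList) (-1) []
  (PySem.List.slice (PySem.Chars.splitOn u4 "/".toList) (some 1) none).filter
      (fun s => !s.isEmpty)

-- Pre_ excludes exactly the urls on which A raises IndexError: a path segment of 30+ chars
-- containing an empty '-'-piece (leading, trailing or double dash), where acronymize does
-- item.upper()[0] on the empty string.
def Pre_generate_bc (url : String) (separator : String) : Prop :=
  ∀ s ∈ pvSegsPre url.toList, 30 ≤ s.length → [] ∉ PySem.Chars.splitOn s "-".toList
instance (url : String) (separator : String) : Decidable (Pre_generate_bc url separator) := by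
  unfold Pre_generate_bc; infer_instance

def pvWitness_generate_bc : String × String := ("http://pypix.com/tools-and-scripts/flot", " / ")

def Spec_generate_bc (url : String) (separator : String) (out : String) : Prop :=
  out = generate_bc_alt url separator
instance (url : String) (separator : String) (out : String) : Decidable (Spec_generate_bc url separator out) := by
  unfold Spec_generate_bc; infer_instance

-- ===== CLAIM =====
def Claim_equal_generate_bc : Prop := ∀ (url : String) (separator : String), Dom_generate_bc url separator → Pre_generate_bc url separator → Spec_generate_bc url separator (generate_bc url separator)

-- ===== LEMMAS AND PROOFS =====

theorem pv_first_eq (w : List Char) :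
    (PySem.List.pyGet? (PySem.Chars.upper w) 0).elim [] (fun c => [c])
      = PySem.Chars.upper (PySem.List.slice w none (some 1)) := by
  cases w with
  | nil => simp [PySem.Chars.upper, PySem.List.slice, PySem.List.pyGet?]
  | cons c t =>
    have h1 : PySem.List.slice (c :: t) none (some 1) = List.take 1 (c :: t) := by
      simpa using PySem.List.slice_to_natCast (c :: t) 1
    rw [h1]; simp [PySem.Chars.upper]

theorem pv_name_eq (seg : List Char) :
    (if PySem.Chars.len seg < 30 then
        PySem.Chars.replace (PySem.Chars.upper seg) "-".toList " ".toList
     else pvAcronymize seg) = pvTitle seg := by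
  unfold pvTitle pvAcronymize
  split
  · rfl
  · simp only [pv_first_eq]

-- the running-prefix table, a proof-side characterisation of A's href values
def pvPrefixes (acc : List Char) : List (List Char) → List (List Char)
  | [] => []
  | s :: rest =>
    let acc' := acc ++ s ++ "/".toList
    acc' :: pvPrefixes acc' rest

-- the crumb list pvWalk's recursion produces, before the separator is interleaved
def pvCrumbs (pre : List Char) : List (List Char) → List (List Char)
  | [] => []
  | seg :: rest =>
    let pre' := pre ++ seg ++ "/".toList
    if rest = [] then ["<span class=\"active\">".toList ++ pvTitle seg ++ "</span>".toList]
    else ("<a href=\"/".toList ++ pre' ++ "\">".toList ++ pvTitle seg ++ "</a>".toList)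
      :: pvCrumbs pre' rest

theorem pv_prefixes_length (segs : List (List Char)) (acc : List Char) :
    (pvPrefixes acc segs).length = segs.length := by
  induction segs generalizing acc with
  | nil => rfl
  | cons s rest ih => simp [pvPrefixes, ih]

theorem pv_prefixes_getElem? (segs : List (List Char)) (acc : List Char) (i : Nat)
    (h : i < segs.length) :
    (pvPrefixes acc segs)[i]? =
      some (acc ++ PySem.Chars.join "/".toList (List.take (i+1) segs) ++ "/".toList) := by
  induction segs generalizing acc i with
  | nil => simp at h
  | cons s rest ih =>
    cases i with
    | zero =>
      simp [pvPrefixes, PySem.Chars.join_singleton]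
    | succ j =>
      have hj : j < rest.length := by simpa using h
      cases rest with
      | nil => simp at hj
      | cons r rs =>
        rw [show (pvPrefixes acc (s :: r :: rs))
              = (acc ++ s ++ "/".toList) :: pvPrefixes (acc ++ s ++ "/".toList) (r :: rs) from rfl]
        rw [List.getElem?_cons_succ, ih _ _ hj]
        rw [show List.take (j+1+1) (s :: r :: rs) = s :: r :: List.take j rs from rfl,
            PySem.Chars.join_cons_cons, List.take_succ_cons]
        simp

theorem pv_res_eq (segs names : List (List Char)) (hlen : names.length = segs.length)
    (hne : segs ≠ []) :
    (List.range segs.length).foldl (fun (res : List (List Char)) (i : Nat) =>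
      let href := PySem.Chars.join "/".toList (PySem.List.slice segs none (some ((i : Int) + 1))) ++ "/".toList
      if i ≠ names.length - 1 then
        res ++ ["<a href=\"/".toList ++ href ++ "\">".toList ++ PySem.List.pyGetD names (i : Int) [] ++ "</a>".toList]
      else
        res ++ ["<span class=\"active\">".toList ++ PySem.List.pyGetD names (i : Int) [] ++ "</span>".toList])
      ["<a href=\"/\">HOME</a>".toList]
    = "<a href=\"/\">HOME</a>".toList ::
      (((pvPrefixes [] segs).dropLast.zip names.dropLast).map (fun pn =>
          "<a href=\"/".toList ++ pn.1 ++ "\">".toList ++ pn.2 ++ "</a>".toList)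
        ++ ["<span class=\"active\">".toList ++ PySem.List.pyGetD names (-1) [] ++ "</span>".toList]) := by
  obtain ⟨m, hm⟩ : ∃ m, segs.length = m + 1 :=
    ⟨segs.length - 1, by cases segs <;> simp_all⟩
  have hnames : names ≠ [] := by
    intro h; rw [h] at hlen; simp [hm] at hlen
  rw [PySem.List.foldl_congr_mem (List.range segs.length) _
      (fun (res : List (List Char)) (i : Nat) => res ++ [if i ≠ names.length - 1 then
          "<a href=\"/".toList ++ (PySem.Chars.join "/".toList (PySem.List.slice segs none (some ((i : Int) + 1))) ++ "/".toList) ++ "\">".toList ++ PySem.List.pyGetD names (i : Int) [] ++ "</a>".toList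
        else
          "<span class=\"active\">".toList ++ PySem.List.pyGetD names (i : Int) [] ++ "</span>".toList])
      _ (by intro acc x hx; by_cases hc : x ≠ names.length - 1 <;> simp [hc])]
  rw [PySem.List.foldl_append_singleton_eq_map]
  rw [hm, List.range_succ, List.map_append]
  have hmn : names.length = m + 1 := by omega
  have hplen : (pvPrefixes [] segs).length = m + 1 := by
    rw [pv_prefixes_length]; exact hm
  have h2 : PySem.List.pyGetD names (m : Int) [] = PySem.List.pyGetD names (-1) [] := by
    rw [PySem.List.pyGetD_neg_one names [] hnames, PySem.List.pyGetD_natCast,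
        List.getLast_eq_getElem, List.getD_eq_getElem names [] (by omega)]
    congr 1; omega
  have h1 : (List.range m).map (fun (i : Nat) =>
      if i ≠ names.length - 1 then
        "<a href=\"/".toList ++ (PySem.Chars.join "/".toList (PySem.List.slice segs none (some ((i : Int) + 1))) ++ "/".toList) ++ "\">".toList ++ PySem.List.pyGetD names (i : Int) [] ++ "</a>".toList
      else
        "<span class=\"active\">".toList ++ PySem.List.pyGetD names (i : Int) [] ++ "</span>".toList)
      = ((pvPrefixes [] segs).dropLast.zip names.dropLast).map (fun pn =>
          "<a href=\"/".toList ++ pn.1 ++ "\">".toList ++ pn.2 ++ "</a>".toList) := by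
    apply List.ext_getElem
    · simp [hplen, hmn]
    · intro i hi1 hi2
      have him : i < m := by simpa using hi1
      have hiseg : i < segs.length := by omega
      rw [List.getElem_map, List.getElem_range, List.getElem_map, List.getElem_zip,
          List.getElem_dropLast, List.getElem_dropLast]
      have hne' : i ≠ names.length - 1 := by omega
      rw [if_pos hne']
      have hslice : PySem.List.slice segs none (some ((i : Int) + 1)) = List.take (i+1) segs := by
        have := PySem.List.slice_to_natCast segs (i+1)
        rwa [show (((i+1 : Nat)) : Int) = (i : Int) + 1 by push_cast; ring] at this
      have hpref : (pvPrefixes [] segs)[i] =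
          PySem.Chars.join "/".toList (List.take (i+1) segs) ++ "/".toList := by
        have hh := pv_prefixes_getElem? segs [] i hiseg
        rw [List.getElem?_eq_getElem (by omega)] at hh
        simpa using hh
      rw [hpref, hslice, PySem.List.pyGetD_natCast, List.getD_eq_getElem names [] (by omega)]
  rw [h1]
  simp only [List.map_cons, List.map_nil]
  rw [if_neg (by omega), h2]
  rfl

theorem pv_crumbs_ne (pre : List Char) (segs : List (List Char)) (h : segs ≠ []) :
    pvCrumbs pre segs ≠ [] := by
  cases segs with
  | nil => exact absurd rfl h
  | cons s rest =>
    unfold pvCrumbs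
    by_cases hr : rest = [] <;> simp [hr]

-- pvCrumbs with empty start prefix is exactly the zip-form of A's res_list tail
theorem pv_crumbs_zip (segs : List (List Char)) (pre : List Char) (h : segs ≠ []) :
    pvCrumbs pre segs =
      ((pvPrefixes pre segs).dropLast.zip ((segs.map pvTitle).dropLast)).map (fun pn =>
          "<a href=\"/".toList ++ pn.1 ++ "\">".toList ++ pn.2 ++ "</a>".toList)
        ++ ["<span class=\"active\">".toList ++ PySem.List.pyGetD (segs.map pvTitle) (-1) [] ++ "</span>".toList] := by
  induction segs generalizing pre with
  | nil => exact absurd rfl h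
  | cons seg rest ih =>
    cases rest with
    | nil =>
      have h1 : PySem.List.pyGetD [pvTitle seg] (-1) [] = pvTitle seg := by
        simpa using PySem.List.pyGetD_neg_one_append_singleton (xs := []) (x := pvTitle seg) (d := [])
      simp [pvCrumbs, pvPrefixes, h1]
    | cons r rs =>
      have hr : (r :: rs : List (List Char)) ≠ [] := by simp
      have hpne : pvPrefixes (pre ++ seg ++ "/".toList) (r :: rs) ≠ [] := by
        intro hh
        have := pv_prefixes_length (r :: rs) (pre ++ seg ++ "/".toList)
        rw [hh] at this; simp at this
      have hnne : ((r :: rs).map pvTitle) ≠ [] := by simp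
      rw [show pvCrumbs pre (seg :: r :: rs)
            = ("<a href=\"/".toList ++ (pre ++ seg ++ "/".toList) ++ "\">".toList ++ pvTitle seg ++ "</a>".toList)
              :: pvCrumbs (pre ++ seg ++ "/".toList) (r :: rs) from by simp [pvCrumbs]]
      rw [ih (pre ++ seg ++ "/".toList) hr]
      rw [show pvPrefixes pre (seg :: r :: rs)
            = (pre ++ seg ++ "/".toList) :: pvPrefixes (pre ++ seg ++ "/".toList) (r :: rs) from rfl]
      rw [List.dropLast_cons_of_ne_nil hpne]
      rw [show (seg :: r :: rs).map pvTitle = pvTitle seg :: (r :: rs).map pvTitle from rfl]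
      rw [List.dropLast_cons_of_ne_nil hnne]
      rw [List.zip_cons_cons, List.map_cons]
      have hlast : PySem.List.pyGetD (pvTitle seg :: pvTitle r :: List.map pvTitle rs) (-1) []
          = PySem.List.pyGetD (pvTitle r :: List.map pvTitle rs) (-1) [] := by
        rw [PySem.List.pyGetD_neg_one _ _ (by simp), PySem.List.pyGetD_neg_one _ _ (by simp)]
        exact List.getLast_cons (by simp)
      rw [hlast]
      simp

-- pvWalk is the separator-join of the crumb list
theorem pv_walk_join (segs : List (List Char)) (pre sep : List Char) (h : segs ≠ []) :
    pvWalk sep pre segs = PySem.Chars.join sep (pvCrumbs pre segs) := by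
  induction segs generalizing pre with
  | nil => exact absurd rfl h
  | cons seg rest ih =>
    cases rest with
    | nil => simp [pvWalk, pvCrumbs, PySem.Chars.join_singleton]
    | cons r rs =>
      have hr : (r :: rs : List (List Char)) ≠ [] := by simp
      have hcne : pvCrumbs (pre ++ seg ++ "/".toList) (r :: rs) ≠ [] :=
        pv_crumbs_ne _ _ hr
      rw [show pvWalk sep pre (seg :: r :: rs)
            = "<a href=\"/".toList ++ (pre ++ seg ++ "/".toList) ++ "\">".toList ++ pvTitle seg ++ "</a>".toList ++ sep ++
                pvWalk sep (pre ++ seg ++ "/".toList) (r :: rs) from by simp [pvWalk]]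
      rw [show pvCrumbs pre (seg :: r :: rs)
            = ("<a href=\"/".toList ++ (pre ++ seg ++ "/".toList) ++ "\">".toList ++ pvTitle seg ++ "</a>".toList)
              :: pvCrumbs (pre ++ seg ++ "/".toList) (r :: rs) from by simp [pvCrumbs]]
      obtain ⟨c, cs, hc⟩ := List.exists_cons_of_ne_nil hcne
      rw [ih _ hr, hc, PySem.Chars.join_cons_cons]

-- ===== VERDICT =====
theorem generate_bc_spec : Claim_equal_generate_bc := by
  intro url sep _ _
  show generate_bc url sep = generate_bc_alt url sep
  unfold generate_bc generate_bc_alt pvTailA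
  have hprep : pvPrepA url.toList = pvPrepB url.toList := rfl
  rw [hprep]
  by_cases h : pvPrepB url.toList = []
  · simp only [h, reduceIte]
  · rw [if_neg h, if_neg h]
    simp only [pv_name_eq]
    rw [pv_res_eq (pvPrepB url.toList) ((pvPrepB url.toList).map pvTitle) (by simp) h]
    rw [← pv_crumbs_zip (pvPrepB url.toList) [] h]
    have hcne := pv_crumbs_ne [] (pvPrepB url.toList) h
    obtain ⟨c, cs, hc⟩ := List.exists_cons_of_ne_nil hcne
    rw [hc, PySem.Chars.join_cons_cons, pv_walk_join (pvPrepB url.toList) [] sep.toList h, hc]
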